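-- pv_equiv track=rewrite | github.com/cpoopc/share-libs | packages/jira-ticket-sync/cptools_jira_ticket_sync/import_engine.py | _dedupe_confirmed_fields
-- ===== SOURCE A (Python) =====
-- from typing import Any
--
-- def _dedupe_confirmed_fields(
--     confirmed_fields: list[dict[str, Any]],
--     common_field_names: set[str],
-- ) -> list[dict[str, Any]]:
--     deduped: dict[tuple[str, str], dict[str, Any]] = {}
--     for item in confirmed_fields:
--         if item["field"] in common_field_names:
--             continue
--         key = (item["issue_type"], item["field"])
--         deduped.setdefault(key, item)
--     return sorted(deduped.values(), key=lambda item: (item["issue_type"], item["field"]))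
-- ===== SOURCE B (Python) =====
-- from typing import Any
--
-- def _dedupe_confirmed_fields(
--     confirmed_fields: list[dict[str, Any]],
--     common_field_names: set[str],
-- ) -> list[dict[str, Any]]:
--     ordered = sorted(
--         (item for item in confirmed_fields if item["field"] not in common_field_names),
--         key=lambda item: (item["issue_type"], item["field"]),
--     )
--     result: list[dict[str, Any]] = []
--     prev_key = None
--     for item in ordered:
--         key = (item["issue_type"], item["field"])
--         if key != prev_key:
--             result.append(item)
--             prev_key = key
--     return result
-- ===== Notes on version B (the rewrite author's own statement) =====
-- stated objective: alternative
-- what changed: A dedupes through a dict keyed by (issue_type, field) via setdefault and then sorts its values; B filters once, stably sorts the whole filtered list by (issue_type, field), and drops adjacent repeated keys in a single linear pass (stability makes the kept item the first occurrence, matching setdefault).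
import Mathlib
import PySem

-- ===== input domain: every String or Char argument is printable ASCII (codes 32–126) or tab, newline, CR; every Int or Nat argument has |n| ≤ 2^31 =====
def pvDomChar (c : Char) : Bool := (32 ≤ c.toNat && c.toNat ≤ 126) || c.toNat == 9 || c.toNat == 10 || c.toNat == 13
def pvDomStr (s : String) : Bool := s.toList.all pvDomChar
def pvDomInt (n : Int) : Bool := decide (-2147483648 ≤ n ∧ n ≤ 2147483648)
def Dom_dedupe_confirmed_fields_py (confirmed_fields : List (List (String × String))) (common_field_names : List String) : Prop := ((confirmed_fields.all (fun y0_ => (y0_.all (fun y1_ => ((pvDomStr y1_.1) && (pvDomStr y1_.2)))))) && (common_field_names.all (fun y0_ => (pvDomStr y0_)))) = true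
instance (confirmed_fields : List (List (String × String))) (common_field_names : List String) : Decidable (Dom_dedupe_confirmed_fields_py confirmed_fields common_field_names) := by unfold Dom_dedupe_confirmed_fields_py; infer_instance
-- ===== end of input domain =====

-- B replaces A's dict-of-first-occurrences-then-sort with one stable sort of the filtered list
-- followed by a single linear pass dropping adjacent repeated keys (objective: alternative).

-- shared transliteration helper: Python's item["k"] on a dict rendered as an association list
-- (first-match lookup; the "" default is never read under Pre_, which requires the key present)
def pvLookup (it : List (String × String)) (k : String) : Option String :=
  (it.find? (fun p => p.1 == k)).map (fun p => p.2)

def pvGetStr (it : List (String × String)) (k : String) : String :=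
  (pvLookup it k).getD ""

-- the tuple (item["issue_type"], item["field"]) both Pythons build
def pvKey2 (it : List (String × String)) : String × String :=
  (pvGetStr it "issue_type", pvGetStr it "field")

-- ===== PORT A =====
def dedupe_confirmed_fields_py (confirmed_fields : List (List (String × String))) (common_field_names : List String) : List (List (String × String)) :=
  let deduped : PySem.Dict (String × String) (List (String × String)) :=
    confirmed_fields.foldl
      (fun d item =>
        if common_field_names.contains (pvGetStr item "field") then d
        else d.setdefault (pvKey2 item) item)
      PySem.Dict.empty
  PySem.List.sorted2 deduped.values
    (fun item => pvGetStr item "issue_type") (fun item => pvGetStr item "field")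

-- ===== PORT B =====
def dedupe_confirmed_fields_py_alt (confirmed_fields : List (List (String × String))) (common_field_names : List String) : List (List (String × String)) :=
  let ordered := PySem.List.sorted2
    (confirmed_fields.filter (fun item => !(common_field_names.contains (pvGetStr item "field"))))
    (fun item => pvGetStr item "issue_type") (fun item => pvGetStr item "field")
  (ordered.foldl
    (fun (st : List (List (String × String)) × Option (String × String)) item =>
      if st.2 = some (pvKey2 item) then st else (st.1 ++ [item], some (pvKey2 item)))
    ([], none)).1

-- ===== PRECONDITION & SPEC =====
-- Pre_ excludes exactly the inputs on which the Python A raises KeyError: an item without a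
-- "field" key, or an item whose field is not common but which lacks an "issue_type" key.
def Pre_dedupe_confirmed_fields_py (confirmed_fields : List (List (String × String))) (common_field_names : List String) : Prop :=
  ∀ it ∈ confirmed_fields, "field" ∈ it.map Prod.fst ∧
    (pvGetStr it "field" ∈ common_field_names ∨ "issue_type" ∈ it.map Prod.fst)
instance (confirmed_fields : List (List (String × String))) (common_field_names : List String) : Decidable (Pre_dedupe_confirmed_fields_py confirmed_fields common_field_names) := by unfold Pre_dedupe_confirmed_fields_py; infer_instance

def pvWitness_dedupe_confirmed_fields_py : (List (List (String × String))) × List String :=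
  ([[("field", "a"), ("issue_type", "Bug")], [("field", "x"), ("issue_type", "Bug")]], ["x"])

def Spec_dedupe_confirmed_fields_py (confirmed_fields : List (List (String × String))) (common_field_names : List String) (out : List (List (String × String))) : Prop := out = dedupe_confirmed_fields_py_alt confirmed_fields common_field_names
instance (confirmed_fields : List (List (String × String))) (common_field_names : List String) (out : List (List (String × String))) : Decidable (Spec_dedupe_confirmed_fields_py confirmed_fields common_field_names out) := by unfold Spec_dedupe_confirmed_fields_py; infer_instance

-- ===== CLAIM (what is proved, stated in full; the proofs are below) =====
def Claim_equal_dedupe_confirmed_fields_py : Prop := ∀ (confirmed_fields : List (List (String × String))) (common_field_names : List String), Dom_dedupe_confirmed_fields_py confirmed_fields common_field_names → Pre_dedupe_confirmed_fields_py confirmed_fields common_field_names → Spec_dedupe_confirmed_fields_py confirmed_fields common_field_names (dedupe_confirmed_fields_py confirmed_fields common_field_names)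

-- ===== LEMMAS AND PROOFS =====

-- the sort key, as one lexicographically ordered value
def pvKeyL (it : List (String × String)) : Lex (String × String) := toLex (pvKey2 it)

-- first occurrence per key (insertion order), `seen` = keys already taken
def pvFO (seen : List (String × String)) : List (List (String × String)) → List (List (String × String))
  | [] => []
  | it :: t => if pvKey2 it ∈ seen then pvFO seen t else it :: pvFO (seen ++ [pvKey2 it]) t

-- adjacent dedupe, `prev` = key of the last item kept
def pvDD (prev : Option (String × String)) : List (List (String × String)) → List (List (String × String))
  | [] => []
  | x :: t => if prev = some (pvKey2 x) then pvDD prev t else x :: pvDD (some (pvKey2 x)) t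

-- Python's tuple sort key is the lexicographic order on the pair
theorem pv_sorted2_eq_sorted (xs : List (List (String × String))) :
    PySem.List.sorted2 xs (fun item => pvGetStr item "issue_type") (fun item => pvGetStr item "field")
      = PySem.List.sorted xs pvKeyL := by
  have hb : (fun (a b : List (String × String)) =>
        decide (pvGetStr a "issue_type" < pvGetStr b "issue_type") ||
          (!decide (pvGetStr b "issue_type" < pvGetStr a "issue_type") &&
            decide (pvGetStr a "field" < pvGetStr b "field")))
      = fun a b => decide (pvKeyL a < pvKeyL b) := by
    funext a b
    simp only [pvKeyL, pvKey2, Prod.Lex.lt_iff, ofLex_toLex]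
    rcases lt_trichotomy (pvGetStr a "issue_type") (pvGetStr b "issue_type") with h | h | h
    · rw [decide_eq_true h, decide_eq_false (asymm h), decide_eq_true (Or.inl h)]
      rfl
    · have e1 : decide (pvGetStr a "issue_type" < pvGetStr b "issue_type") = false :=
        decide_eq_false (by rw [h]; exact lt_irrefl _)
      have e2 : decide (pvGetStr b "issue_type" < pvGetStr a "issue_type") = false :=
        decide_eq_false (by rw [h]; exact lt_irrefl _)
      rw [e1, e2]
      by_cases h2 : pvGetStr a "field" < pvGetStr b "field"
      · rw [decide_eq_true h2, decide_eq_true (Or.inr ⟨h, h2⟩)]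
        rfl
      · rw [decide_eq_false h2, decide_eq_false (fun hor => Or.elim hor
          (fun h1 => absurd h1 (by rw [h]; exact lt_irrefl _)) (fun hand => h2 hand.2))]
        rfl
    · rw [decide_eq_false (asymm h), decide_eq_true h,
        decide_eq_false (fun hor => Or.elim hor (fun h1 => asymm h h1) (fun hand => ne_of_gt h hand.1))]
      rfl
  simp only [PySem.List.sorted2, PySem.List.sorted, Bool.false_eq_true, if_false]
  rw [hb]


-- skipping inside the loop = folding over the filtered list
theorem pv_foldl_skip {α δ : Type} (c : α → Bool) (f : δ → α → δ) :
    ∀ (L : List α) (d : δ),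
      L.foldl (fun d x => if c x then d else f d x) d
        = (L.filter (fun x => !c x)).foldl f d := by
  intro L
  induction L with
  | nil => intro d; rfl
  | cons x t ih =>
    intro d
    by_cases h : c x = true <;>
      simp [h, ih]


-- the setdefault loop keeps, in insertion order, the first item per key
theorem pv_values_fold :
    ∀ (L : List (List (String × String))) (d : PySem.Dict (String × String) (List (String × String))),
      d.keys.Nodup →
      (L.foldl (fun d it => d.setdefault (pvKey2 it) it) d).values = d.values ++ pvFO d.keys L := by
  intro L
  induction L with
  | nil => intro d _; simp [pvFO]
  | cons it t ih =>
    intro d hnd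
    by_cases h : pvKey2 it ∈ d.keys
    · have hc : d.contains (pvKey2 it) = true := (PySem.Dict.contains_iff_mem_keys d _).mpr h
      rw [List.foldl_cons, PySem.Dict.setdefault_of_contains d it hc, ih d hnd]
      simp [pvFO, h]
    · have hc : d.contains (pvKey2 it) = false := by
        cases hcb : d.contains (pvKey2 it)
        · rfl
        · exact absurd ((PySem.Dict.contains_iff_mem_keys d _).mp hcb) h
      have hvals : (d.insert (pvKey2 it) it).values = d.values ++ [it] := by
        simp [PySem.Dict.values, PySem.Dict.items_insert_of_not_contains d it hc]
      rw [List.foldl_cons, PySem.Dict.setdefault_of_not_contains d it hc,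
        ih _ (PySem.Dict.nodup_keys_insert d _ it hnd), hvals,
        PySem.Dict.keys_insert_of_not_contains d it hc]
      simp [pvFO, h]


theorem pv_FO_filter :
    ∀ (L : List (List (String × String))) (seen : List (String × String)) (k : String × String),
      (pvFO seen L).filter (fun a => pvKey2 a == k)
        = if k ∈ seen then [] else (L.filter (fun a => pvKey2 a == k)).take 1 := by
  intro L
  induction L with
  | nil => intro seen k; simp [pvFO]
  | cons it t ih =>
    intro seen k
    by_cases hmem : pvKey2 it ∈ seen
    · by_cases hk : pvKey2 it = k
      · subst hk
        simp [pvFO, hmem, ih]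
      · simp [pvFO, hmem, ih, hk]
    · by_cases hk : pvKey2 it = k
      · subst hk
        have : (pvFO (seen ++ [pvKey2 it]) t).filter (fun a => pvKey2 a == pvKey2 it) = [] := by
          rw [ih]
          simp
        simp [pvFO, hmem, this]
      · have hne : ¬ k = pvKey2 it := fun he => hk he.symm
        have : k ∈ seen ++ [pvKey2 it] ↔ k ∈ seen := by
          simp [List.mem_append, hne]
        simp [pvFO, hmem, ih, hk, this]


theorem pv_FO_keys :
    ∀ (L : List (List (String × String))) (seen : List (String × String)),
      ((pvFO seen L).map pvKey2).Nodup ∧ ∀ k ∈ (pvFO seen L).map pvKey2, k ∉ seen := by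
  intro L
  induction L with
  | nil => intro seen; simp [pvFO]
  | cons it t ih =>
    intro seen
    by_cases hmem : pvKey2 it ∈ seen
    · simpa [pvFO, hmem] using ih seen
    · obtain ⟨ihn, ihs⟩ := ih (seen ++ [pvKey2 it])
      have hred : pvFO seen (it :: t) = it :: pvFO (seen ++ [pvKey2 it]) t := by
        simp [pvFO, hmem]
      rw [hred]
      refine ⟨?_, ?_⟩
      · rw [List.map_cons, List.nodup_cons]
        refine ⟨fun hmem2 => (ihs _ hmem2) (by simp), ihn⟩
      · intro k hk
        rw [List.map_cons, List.mem_cons] at hk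
        rcases hk with rfl | hk
        · exact hmem
        · exact fun hs => (ihs k hk) (by simp [List.mem_append, hs])


theorem pv_B_fold :
    ∀ (L acc : List (List (String × String))) (prev : Option (String × String)),
      (L.foldl (fun st item => if st.2 = some (pvKey2 item) then st else (st.1 ++ [item], some (pvKey2 item))) (acc, prev)).1
        = acc ++ pvDD prev L := by
  intro L
  induction L with
  | nil => intro acc prev; simp [pvDD]
  | cons x t ih =>
    intro acc prev
    by_cases h : prev = some (pvKey2 x)
    · simp [pvDD, h, ih]
    · simp [pvDD, h, ih]


theorem pv_insertBy_pairwise (x : List (String × String)) :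
    ∀ acc, acc.Pairwise (fun a b => pvKeyL a ≤ pvKeyL b) →
      (PySem.List.insertBy (fun a b => decide (pvKeyL a < pvKeyL b)) x acc).Pairwise
        (fun a b => pvKeyL a ≤ pvKeyL b) := by
  intro acc
  induction acc with
  | nil => intro _; simp [PySem.List.insertBy]
  | cons a t ih =>
    intro hpw
    obtain ⟨ha, hpt⟩ := List.pairwise_cons.mp hpw
    by_cases hba : pvKeyL x < pvKeyL a
    · simp only [PySem.List.insertBy, decide_eq_true_eq, if_pos hba]
      refine List.Pairwise.cons ?_ hpw
      intro y hy
      rcases List.mem_cons.mp hy with rfl | hy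
      · exact le_of_lt hba
      · exact le_of_lt (lt_of_lt_of_le hba (ha y hy))
    · simp only [PySem.List.insertBy, decide_eq_true_eq, if_neg hba]
      refine List.Pairwise.cons ?_ (ih hpt)
      intro y hy
      rcases (PySem.List.mem_insertBy _ x y t).mp hy with rfl | hy
      · exact le_of_not_gt hba
      · exact ha y hy


theorem pv_insertBy_filter_ne (x : List (String × String)) (k : String × String) (h : pvKey2 x ≠ k) :
    ∀ acc, (PySem.List.insertBy (fun a b => decide (pvKeyL a < pvKeyL b)) x acc).filter (fun a => pvKey2 a == k)
      = acc.filter (fun a => pvKey2 a == k) := by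
  intro acc
  induction acc with
  | nil => simp [PySem.List.insertBy, beq_iff_eq, h]
  | cons a t ih =>
    by_cases hba : pvKeyL x < pvKeyL a
    · simp [PySem.List.insertBy, hba, beq_iff_eq, h]
    · simp [PySem.List.insertBy, hba, List.filter_cons, ih]


theorem pv_insertBy_filter_self (x : List (String × String)) :
    ∀ acc, acc.Pairwise (fun a b => pvKeyL a ≤ pvKeyL b) →
      (PySem.List.insertBy (fun a b => decide (pvKeyL a < pvKeyL b)) x acc).filter (fun a => pvKey2 a == pvKey2 x)
        = acc.filter (fun a => pvKey2 a == pvKey2 x) ++ [x] := by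
  intro acc
  induction acc with
  | nil => intro _; simp [PySem.List.insertBy]
  | cons a t ih =>
    intro hpw
    obtain ⟨ha, hpt⟩ := List.pairwise_cons.mp hpw
    by_cases hba : pvKeyL x < pvKeyL a
    · have hnil : (a :: t).filter (fun y => pvKey2 y == pvKey2 x) = [] := by
        rw [List.filter_eq_nil_iff]
        intro y hy
        have hay : pvKeyL a ≤ pvKeyL y := by
          rcases List.mem_cons.mp hy with rfl | hy
          · exact le_refl _
          · exact ha y hy
        have : pvKeyL x < pvKeyL y := lt_of_lt_of_le hba hay
        simp only [beq_iff_eq]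
        intro he
        exact absurd (by simp [pvKeyL, he]) (ne_of_gt this)
      simp only [PySem.List.insertBy, decide_eq_true_eq, if_pos hba]
      rw [List.filter_cons_of_pos (by simp), hnil]
      simp
    · simp only [PySem.List.insertBy, decide_eq_true_eq, if_neg hba]
      rw [List.filter_cons, List.filter_cons]
      by_cases hax : pvKey2 a == pvKey2 x
      · simp [hax, ih hpt]
      · simp [hax, ih hpt]


-- STABILITY: sorting does not change the subsequence of items with a given key
theorem pv_sorted_filter (xs : List (List (String × String))) (k : String × String) :
    (PySem.List.sorted xs pvKeyL).filter (fun a => pvKey2 a == k) = xs.filter (fun a => pvKey2 a == k) := by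
  have main : ∀ (L acc : List (List (String × String))),
      acc.Pairwise (fun a b => pvKeyL a ≤ pvKeyL b) →
      (L.foldl (fun acc x => PySem.List.insertBy (fun a b => decide (pvKeyL a < pvKeyL b)) x acc) acc).filter
          (fun a => pvKey2 a == k)
        = acc.filter (fun a => pvKey2 a == k) ++ L.filter (fun a => pvKey2 a == k) := by
    intro L
    induction L with
    | nil => intro acc _; simp
    | cons x t ih =>
      intro acc hpw
      rw [List.foldl_cons, ih _ (pv_insertBy_pairwise x acc hpw), List.filter_cons]
      by_cases hx : pvKey2 x = k
      · subst hx
        rw [pv_insertBy_filter_self x acc hpw]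
        simp
      · rw [pv_insertBy_filter_ne x k hx acc]
        simp [hx]
  rw [PySem.List.sorted_eq_foldl_insertBy xs pvKeyL]
  simpa using main xs [] (by simp)


-- the adjacent dedupe of a key-sorted list keeps exactly the head of each equal-key run
theorem pv_dd_filter :
    ∀ (S : List (List (String × String))) (prev : Option (String × String)) (k : String × String),
      S.Pairwise (fun a b => pvKeyL a ≤ pvKeyL b) →
      (∀ p, prev = some p → ∀ y ∈ S, toLex p ≤ pvKeyL y) →
      (pvDD prev S).filter (fun a => pvKey2 a == k)
        = if prev = some k then [] else (S.filter (fun a => pvKey2 a == k)).take 1 := by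
  intro S
  induction S with
  | nil =>
    intro prev k _ _
    simp [pvDD]
  | cons x t ih =>
    intro prev k hpw hprev
    obtain ⟨hx, hpt⟩ := List.pairwise_cons.mp hpw
    by_cases h1 : prev = some (pvKey2 x)
    · rw [pvDD, if_pos h1, ih prev k hpt (fun p hp y hy => hprev p hp y (List.mem_cons_of_mem x hy))]
      by_cases h2 : prev = some k
      · simp [h2]
      · have hk : pvKey2 x ≠ k := fun he => h2 (by rw [h1, he])
        simp [h2, hk]
    · rw [pvDD, if_neg h1]
      by_cases hk : pvKey2 x = k
      · subst hk
        have htail : (pvDD (some (pvKey2 x)) t).filter (fun a => pvKey2 a == pvKey2 x) = [] := by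
          rw [ih (some (pvKey2 x)) (pvKey2 x) hpt (fun p hp y hy => by
            cases Option.some.inj hp
            exact hx y hy)]
          simp
        rw [List.filter_cons_of_pos (by simp), htail, if_neg h1, List.filter_cons_of_pos (by simp)]
        simp
      · rw [List.filter_cons_of_neg (by simp [hk]), ih (some (pvKey2 x)) k hpt (fun p hp y hy => by
          cases Option.some.inj hp
          exact hx y hy)]
        rw [if_neg (fun he => hk (Option.some.inj he))]
        by_cases h2 : prev = some k
        · have hxk : toLex k ≤ pvKeyL x := hprev k h2 x (List.mem_cons_self)
          have hlt : toLex k < pvKeyL x := lt_of_le_of_ne hxk (by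
            intro he
            exact hk (toLex_inj.mp he.symm))
          have hnil : t.filter (fun a => pvKey2 a == k) = [] := by
            rw [List.filter_eq_nil_iff]
            intro y hy
            have : toLex k < pvKeyL y := lt_of_lt_of_le hlt (hx y hy)
            simp only [beq_iff_eq]
            intro he
            exact absurd (by simp [pvKeyL, he]) (ne_of_gt this)
          rw [hnil, if_pos h2]
          simp
        · rw [if_neg h2, List.filter_cons_of_neg (by simp [hk])]


theorem pv_dd_lt :
    ∀ (S : List (List (String × String))) (prev : Option (String × String)),
      S.Pairwise (fun a b => pvKeyL a ≤ pvKeyL b) →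
      (∀ p, prev = some p → ∀ y ∈ S, toLex p ≤ pvKeyL y) →
      (pvDD prev S).Pairwise (fun a b => pvKeyL a < pvKeyL b)
        ∧ ∀ y ∈ pvDD prev S, ∀ p, prev = some p → toLex p < pvKeyL y := by
  intro S
  induction S with
  | nil =>
    intro prev _ _
    simp [pvDD]
  | cons x t ih =>
    intro prev hpw hprev
    obtain ⟨hx, hpt⟩ := List.pairwise_cons.mp hpw
    by_cases h1 : prev = some (pvKey2 x)
    · rw [pvDD, if_pos h1]
      exact ih prev hpt (fun p hp y hy => hprev p hp y (List.mem_cons_of_mem x hy))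
    · rw [pvDD, if_neg h1]
      obtain ⟨ihp, ihs⟩ := ih (some (pvKey2 x)) hpt (fun p hp y hy => by
        cases Option.some.inj hp
        exact hx y hy)
      refine ⟨List.Pairwise.cons ?_ ihp, ?_⟩
      · intro y hy
        exact ihs y hy (pvKey2 x) rfl
      · intro y hy p hp
        rcases List.mem_cons.mp hy with rfl | hy
        · have hle : toLex p ≤ pvKeyL y := hprev p hp y List.mem_cons_self
          refine lt_of_le_of_ne hle ?_
          intro he
          have hpk : p = pvKey2 y := toLex_inj.mp (by simpa [pvKeyL] using he)
          exact h1 (hp.trans (by rw [hpk]))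
        · have h2 : toLex (pvKey2 x) < pvKeyL y := ihs y hy (pvKey2 x) rfl
          exact lt_of_le_of_lt (hprev p hp x List.mem_cons_self) h2


theorem pv_main (confirmed_fields : List (List (String × String))) (common_field_names : List String) :
    dedupe_confirmed_fields_py confirmed_fields common_field_names
      = dedupe_confirmed_fields_py_alt confirmed_fields common_field_names := by
  have hA : dedupe_confirmed_fields_py confirmed_fields common_field_names
      = PySem.List.sorted (pvFO []
          (confirmed_fields.filter (fun item => !(common_field_names.contains (pvGetStr item "field"))))) pvKeyL := by
    simp only [dedupe_confirmed_fields_py]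
    rw [pv_sorted2_eq_sorted]
    congr 1
    rw [pv_foldl_skip, pv_values_fold _ _ (by simp)]
    simp [PySem.Dict.values, PySem.Dict.empty]
  have hB : dedupe_confirmed_fields_py_alt confirmed_fields common_field_names
      = pvDD none (PySem.List.sorted
          (confirmed_fields.filter (fun item => !(common_field_names.contains (pvGetStr item "field")))) pvKeyL) := by
    simp only [dedupe_confirmed_fields_py_alt]
    rw [pv_sorted2_eq_sorted, pv_B_fold]
    simp
  rw [hA, hB]
  set G := confirmed_fields.filter (fun item => !(common_field_names.contains (pvGetStr item "field"))) with hG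
  set S := PySem.List.sorted G pvKeyL with hS
  have hSpw : S.Pairwise (fun a b => pvKeyL a ≤ pvKeyL b) := PySem.List.sorted_pairwise G pvKeyL
  have hinv : ∀ p, (none : Option (String × String)) = some p → ∀ y ∈ S, toLex p ≤ pvKeyL y := by
    intro p hp
    cases hp
  obtain ⟨hlt, _⟩ := pv_dd_lt S none hSpw hinv
  have hfilters : ∀ kk : String × String,
      (pvDD none S).filter (fun a => pvKey2 a == kk) = (pvFO [] G).filter (fun a => pvKey2 a == kk) := by
    intro kk
    rw [pv_dd_filter S none kk hSpw hinv, pv_FO_filter G [] kk]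
    simp [hS, pv_sorted_filter G kk]
  have hmemeq : ∀ a, a ∈ pvDD none S ↔ a ∈ pvFO [] G := by
    intro a
    have h1 : a ∈ pvDD none S ↔ a ∈ (pvDD none S).filter (fun x => pvKey2 x == pvKey2 a) := by
      simp [List.mem_filter]
    have h2 : a ∈ pvFO [] G ↔ a ∈ (pvFO [] G).filter (fun x => pvKey2 x == pvKey2 a) := by
      simp [List.mem_filter]
    rw [h1, h2, hfilters (pvKey2 a)]
  have hnd1 : (pvDD none S).Nodup :=
    hlt.imp (fun {a b} (h : pvKeyL a < pvKeyL b) he => absurd (he ▸ h) (lt_irrefl _))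
  have hnd2 : (pvFO [] G).Nodup := List.Nodup.of_map pvKey2 (pv_FO_keys G []).1
  have hperm : (pvDD none S).Perm (pvFO [] G) :=
    (List.perm_ext_iff_of_nodup hnd1 hnd2).mpr hmemeq
  exact PySem.List.sorted_eq_of_perm_of_pairwise_lt (pvFO [] G) (pvDD none S) pvKeyL hperm hlt



-- ===== VERDICT (by name: the statement is the Claim_ definition above) =====
theorem dedupe_confirmed_fields_py_spec : Claim_equal_dedupe_confirmed_fields_py := by
  intro confirmed_fields common_field_names _ _
  unfold Spec_dedupe_confirmed_fields_py
  exact pv_main confirmed_fields common_field_names
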